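-- pv_equiv track=rewrite | github.com/vilosource/vfwidgets | widgets/theme_system/src/vfwidgets_theme/mapping/mapper.py | _split_selector
-- ===== SOURCE A (Python) =====
-- def _split_selector(selector: str) -> list[str]:
--     """Split selector by combinators while preserving them."""
--     # Simple implementation - split on whitespace and combinators
--     parts = []
--     current = ""
--
--     i = 0
--     while i < len(selector):
--         char = selector[i]
--
--         if char in ">+~":
--             if current.strip():
--                 parts.append(current.strip())
--             parts.append(char)
--             current = ""
--         elif char == " ":
--             if current.strip():
--                 parts.append(current.strip())
--             # Look ahead for multiple spaces
--             while i + 1 < len(selector) and selector[i + 1] == " ":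
--                 i += 1
--             if current.strip():
--                 parts.append(" ")  # Descendant combinator
--             current = ""
--         else:
--             current += char
--
--         i += 1
--
--     if current.strip():
--         parts.append(current.strip())
--
--     return parts
-- ===== SOURCE B (Python) =====
-- def _tokens(selector):
--     """Tokenize into single-char combinators, space runs, and word runs."""
--     toks = []
--     i = 0
--     n = len(selector)
--     while i < n:
--         ch = selector[i]
--         if ch in ">+~":
--             toks.append(ch)
--             i += 1
--         elif ch == " ":
--             j = i + 1
--             while j < n and selector[j] == " ":
--                 j += 1
--             toks.append(selector[i:j])
--             i = j
--         else:
--             j = i + 1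
--             while j < n and selector[j] not in ">+~ ":
--                 j += 1
--             toks.append(selector[i:j])
--             i = j
--     return toks
--
--
-- def _split_selector(selector: str) -> list[str]:
--     """Split selector by combinators while preserving them."""
--     parts = []
--     flag = False  # last token was a word with non-whitespace content
--     for tok in _tokens(selector):
--         if tok[0] in ">+~":
--             parts.append(tok)
--             flag = False
--         elif tok[0] == " ":
--             if flag:
--                 parts.append(" ")  # Descendant combinator
--             flag = False
--         else:
--             s = tok.strip()
--             if s:
--                 parts.append(s)
--             flag = bool(s)
--     return parts
-- ===== Notes on version B (the rewrite author's own statement) =====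
-- stated objective: faster
-- what changed: B tokenizes the selector into combinator / space-run / word-run slices in one scan and then emits parts in a second pass with a had-word flag, instead of A's char-by-char loop that grows a pending buffer one character at a time by string concatenation.
import Mathlib
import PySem

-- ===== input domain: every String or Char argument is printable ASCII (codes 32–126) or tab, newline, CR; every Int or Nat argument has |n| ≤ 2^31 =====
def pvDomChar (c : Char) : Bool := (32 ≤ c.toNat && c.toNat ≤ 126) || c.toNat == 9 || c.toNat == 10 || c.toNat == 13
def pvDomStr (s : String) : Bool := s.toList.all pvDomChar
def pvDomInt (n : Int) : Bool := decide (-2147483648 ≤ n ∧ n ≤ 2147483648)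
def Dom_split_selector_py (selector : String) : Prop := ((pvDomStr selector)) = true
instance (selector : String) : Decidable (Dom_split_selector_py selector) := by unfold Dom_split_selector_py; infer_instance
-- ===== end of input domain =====

-- B tokenizes first and then folds with a flag; A scans char-by-char with a pending buffer. Same return value, proved below.

-- ===== PORT A =====
-- char in ">+~"
def pvComb (c : Char) : Bool := c == '>' || c == '+' || c == '~'

-- A's while loop over i, with state (current, parts); the inner look-ahead
-- `while i+1 < len and selector[i+1] == " ": i += 1` is the dropWhile on the tail.
def pvALoop (cs : List Char) (current : List Char) (parts : List String) : List String :=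
  match cs with
  | [] =>
      if PySem.Chars.strip current ≠ [] then parts ++ [String.ofList (PySem.Chars.strip current)] else parts
  | c :: rest =>
      if pvComb c then
        pvALoop rest []
          ((if PySem.Chars.strip current ≠ [] then parts ++ [String.ofList (PySem.Chars.strip current)] else parts)
            ++ [String.ofList [c]])
      else if c == ' ' then
        pvALoop (rest.dropWhile (· == ' ')) []
          (let p1 := if PySem.Chars.strip current ≠ [] then parts ++ [String.ofList (PySem.Chars.strip current)] else parts
           if PySem.Chars.strip current ≠ [] then p1 ++ [" "] else p1)
      else
        pvALoop rest (current ++ [c]) parts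
termination_by cs.length
decreasing_by
  · simp
  · have := List.length_dropWhile_le (fun x => x == ' ') rest
    simp; omega
  · simp

def split_selector_py (selector : String) : List String :=
  pvALoop selector.toList [] []

-- ===== PORT B =====
def pvWordChar (c : Char) : Bool := !(pvComb c || c == ' ')

-- B's _tokens: combinators as single-char tokens, maximal runs of spaces / word chars
-- (the index-scanning while loops become takeWhile/dropWhile on the tail).
def pvTokens (cs : List Char) : List (List Char) :=
  match cs with
  | [] => []
  | c :: rest =>
      if pvComb c then [c] :: pvTokens rest
      else if c == ' ' then
        (c :: rest.takeWhile (· == ' ')) :: pvTokens (rest.dropWhile (· == ' '))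
      else
        (c :: rest.takeWhile pvWordChar) :: pvTokens (rest.dropWhile pvWordChar)
termination_by cs.length
decreasing_by
  · simp
  · have := List.length_dropWhile_le (fun x => x == ' ') rest
    simp; omega
  · have := List.length_dropWhile_le pvWordChar rest
    simp; omega

-- B's main loop over tokens with the had-word flag. Tokens are never empty;
-- the [] token arm is unreachable and just skips.
def pvBLoop (toks : List (List Char)) (flag : Bool) (parts : List String) : List String :=
  match toks with
  | [] => parts
  | t :: rest =>
      match t with
      | [] => pvBLoop rest flag parts
      | c :: _ =>
          if pvComb c then pvBLoop rest false (parts ++ [String.ofList t])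
          else if c == ' ' then pvBLoop rest false (if flag then parts ++ [" "] else parts)
          else
            let s := PySem.Chars.strip t
            pvBLoop rest (decide (s ≠ [])) (if s ≠ [] then parts ++ [String.ofList s] else parts)

def split_selector_py_alt (selector : String) : List String :=
  pvBLoop (pvTokens selector.toList) false []

-- ===== PRECONDITION & SPEC =====
def Spec_split_selector_py (selector : String) (out : List String) : Prop := out = split_selector_py_alt selector
instance (selector : String) (out : List String) : Decidable (Spec_split_selector_py selector out) := by unfold Spec_split_selector_py; infer_instance

-- ===== CLAIM (what is proved, stated in full; the proofs are below) =====
def Claim_equal_split_selector_py : Prop := ∀ (selector : String), Dom_split_selector_py selector → Spec_split_selector_py selector (split_selector_py selector)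

-- ===== LEMMAS AND PROOFS =====

-- what A will eventually append for a pending buffer
def pvEmit (cur : List Char) : List String :=
  if PySem.Chars.strip cur ≠ [] then [String.ofList (PySem.Chars.strip cur)] else []

theorem pvStripNil : PySem.Chars.strip ([] : List Char) = [] := by decide

-- A consumes a run of word chars by just accumulating them
theorem pvWordShift (w : List Char) (hw : ∀ c ∈ w, pvWordChar c = true) :
    ∀ (rest : List Char) (cur : List Char) (parts : List String),
    pvALoop (w ++ rest) cur parts = pvALoop rest (cur ++ w) parts := by
  induction w with
  | nil => intro rest cur parts; simp
  | cons c t ih =>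
      intro rest cur parts
      have hc : pvWordChar c = true := hw c (by simp)
      have hc' : pvComb c = false ∧ (c == ' ') = false := by
        simpa [pvWordChar, Bool.not_eq_true', Bool.or_eq_false_iff] using hc
      rw [List.cons_append, pvALoop]
      simp only [hc'.1, hc'.2, Bool.false_eq_true, if_false]
      rw [ih (fun d hd => hw d (by simp [hd])) rest (cur ++ [c]) parts]
      simp

theorem pvHeadDropWhile {p : Char → Bool} {l : List Char} {d : Char} {t : List Char}
    (h : l.dropWhile p = d :: t) : p d = false := by
  induction l with
  | nil => simp [List.dropWhile] at h
  | cons a l ih =>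
      by_cases ha : p a
      · rw [List.dropWhile_cons_of_pos ha] at h; exact ih h
      · rw [List.dropWhile_cons_of_neg ha] at h
        cases h; simpa using ha

theorem pvMain : ∀ (n : Nat) (cs : List Char), cs.length ≤ n →
    ∀ (cur : List Char) (parts : List String),
    (cur = [] ∨ ∀ d t, cs = d :: t → pvWordChar d = false) →
    pvALoop cs cur parts
      = pvBLoop (pvTokens cs) (decide (PySem.Chars.strip cur ≠ [])) (parts ++ pvEmit cur) := by
  intro n
  induction n with
  | zero =>
      intro cs hlen cur parts _
      have : cs = [] := by cases cs <;> simp_all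
      subst this
      rw [pvALoop, pvTokens, pvBLoop, pvEmit]
      split_ifs <;> simp
  | succ n ih =>
      intro cs hlen cur parts hcond
      match cs with
      | [] =>
          rw [pvALoop, pvTokens, pvBLoop, pvEmit]
          split_ifs <;> simp
      | c :: rest =>
          have hr : rest.length ≤ n := by simp at hlen; omega
          by_cases hcomb : pvComb c = true
          · rw [pvALoop, pvTokens]
            simp only [hcomb, if_true]
            simp only [pvBLoop, hcomb, if_true]
            rw [ih rest hr [] _ (Or.inl rfl)]
            simp only [pvEmit, pvStripNil]
            split_ifs <;> simp_all
          · by_cases hsp : (c == ' ') = true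
            · rw [pvALoop, pvTokens]
              rw [if_neg hcomb, if_pos hsp, if_neg hcomb, if_pos hsp]
              simp only [pvBLoop]
              rw [if_neg hcomb, if_pos hsp]
              have hd : (rest.dropWhile (· == ' ')).length ≤ n :=
                le_trans (List.length_dropWhile_le _ _) hr
              rw [ih _ hd [] _ (Or.inl rfl)]
              simp only [pvEmit, pvStripNil]
              split_ifs <;> simp_all
            · -- word char
              have h1 : pvComb c = false := by simpa using hcomb
              have h2 : (c == ' ') = false := by simpa using hsp
              have hwc : pvWordChar c = true := by simp [pvWordChar, h1, h2]
              have hcur : cur = [] := by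
                rcases hcond with h | h
                · exact h
                · have := h c rest rfl; simp [hwc] at this
              subst hcur
              obtain ⟨w, hw⟩ : ∃ w, rest.takeWhile pvWordChar = w := ⟨_, rfl⟩
              obtain ⟨rest', hrd⟩ : ∃ r, rest.dropWhile pvWordChar = r := ⟨_, rfl⟩
              rw [pvTokens]
              simp only [h1, h2, Bool.false_eq_true, if_false]
              rw [hw, hrd]
              simp only [pvBLoop, h1, h2, Bool.false_eq_true, if_false]
              have hsplit : rest = w ++ rest' := by
                rw [← hw, ← hrd, List.takeWhile_append_dropWhile]
              have hall : ∀ d ∈ (c :: w), pvWordChar d = true := by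
                intro d hd
                rcases List.mem_cons.mp hd with h | h
                · exact h ▸ hwc
                · exact List.mem_takeWhile_imp (hw ▸ h)
              have hshift := pvWordShift (c :: w) hall rest' [] parts
              have hcs : (c :: rest) = (c :: w) ++ rest' := by
                rw [List.cons_append, ← hsplit]
              rw [hcs, hshift]
              have hcond' : ([] : List Char) ++ (c :: w) = [] ∨
                  (∀ d t, rest' = d :: t → pvWordChar d = false) :=
                Or.inr (fun d t hdt => pvHeadDropWhile (hrd.trans hdt))
              have hr' : rest'.length ≤ n := by
                rw [← hrd]; exact le_trans (List.length_dropWhile_le _ _) hr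
              rw [ih rest' hr' ([] ++ (c :: w)) parts hcond']
              simp only [pvEmit, pvStripNil, List.nil_append]
              split_ifs <;> simp_all

-- ===== VERDICT (by name: the statement is the Claim_ definition above) =====
theorem split_selector_py_spec : Claim_equal_split_selector_py := by
  intro selector _
  unfold Spec_split_selector_py split_selector_py split_selector_py_alt
  have := pvMain selector.toList.length selector.toList le_rfl [] [] (Or.inl rfl)
  simpa [pvEmit, pvStripNil] using this
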